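-- pv_equiv track=rewrite | github.com/bruicecode/mo_ge_answer | str_process.py | replace_repeated_chars
-- ===== SOURCE A (Python) =====
-- def replace_repeated_chars(s, k):
--     output = []
--     for i, char in enumerate(s):
--         if char in s[max(0, i-k):i]:
--             output.append('-')
--         else:
--             output.append(char)
--     return ''.join(output)
-- ===== SOURCE B (Python) =====
-- def replace_repeated_chars(s, k):
--     positions = {}
--     for i, c in enumerate(s):
--         positions.setdefault(c, []).append(i)
--     out = list(s)
--     for idxs in positions.values():
--         for prev, cur in zip(idxs, idxs[1:]):
--             if cur - prev <= k:
--                 out[cur] = '-'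
--     return ''.join(out)
-- ===== Notes on version B (the rewrite author's own statement) =====
-- stated objective: faster
-- what changed: Instead of rescanning a k-wide window of the string at every index, B first groups all occurrence indices per character in one dict-building pass and then marks, per character, each consecutive occurrence pair whose gap is at most k.
import Mathlib
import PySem

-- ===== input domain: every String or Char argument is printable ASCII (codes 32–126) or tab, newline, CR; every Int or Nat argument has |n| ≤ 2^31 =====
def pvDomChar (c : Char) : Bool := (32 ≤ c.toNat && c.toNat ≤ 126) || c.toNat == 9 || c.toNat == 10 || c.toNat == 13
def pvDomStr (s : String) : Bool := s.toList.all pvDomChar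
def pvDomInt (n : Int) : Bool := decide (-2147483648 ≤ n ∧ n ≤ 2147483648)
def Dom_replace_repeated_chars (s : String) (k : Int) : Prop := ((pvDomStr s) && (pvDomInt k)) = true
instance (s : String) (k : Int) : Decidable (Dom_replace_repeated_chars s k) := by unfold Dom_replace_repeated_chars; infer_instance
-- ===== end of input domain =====

-- B groups occurrence indices per character once and marks consecutive occurrence pairs with gap ≤ k,
-- instead of A's per-index rescan of a k-wide window; proved to return the same string on all inputs.


-- ===== PORT A =====
-- Python 'char in s[a:i]' on a 1-char char is element membership of the slice (exact).
def replace_repeated_chars (s : String) (k : Int) : String :=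
  let cs := s.toList
  let output := (PySem.List.enumerate cs).foldl
    (fun acc p =>
      if p.2 ∈ PySem.List.slice cs (some (max 0 (p.1 - k))) (some p.1)
      then acc ++ ['-'] else acc ++ [p.2]) []
  String.ofList output

-- ===== PORT B =====
-- phase 1: positions.setdefault(c, []).append(i)  =  Dict.modify c [] (· ++ [i])
def replace_repeated_chars_alt (s : String) (k : Int) : String :=
  let cs := s.toList
  let d : PySem.Dict Char (List Int) :=
    (PySem.List.enumerate cs).foldl (fun d p => d.modify p.2 [] (· ++ [p.1])) PySem.Dict.empty
  let out := d.values.foldl (fun out idxs =>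
    (idxs.zip idxs.tail).foldl
      (fun o pc => if pc.2 - pc.1 ≤ k then PySem.List.pySetD o pc.2 '-' else o) out) cs
  String.ofList out

-- ===== PRECONDITION & SPEC =====
def Spec_replace_repeated_chars (s : String) (k : Int) (out : String) : Prop := out = replace_repeated_chars_alt s k
instance (s : String) (k : Int) (out : String) : Decidable (Spec_replace_repeated_chars s k out) := by unfold Spec_replace_repeated_chars; infer_instance

-- ===== CLAIM (what is proved, stated in full; the proofs are below) =====
def Claim_equal_replace_repeated_chars : Prop := ∀ (s : String) (k : Int), Dom_replace_repeated_chars s k → Spec_replace_repeated_chars s k (replace_repeated_chars s k)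

-- ===== LEMMAS AND PROOFS =====

def pvOcc (cs : List Char) (c : Char) : List Int :=
  ((PySem.List.enumerate cs).filter (fun p => p.2 == c)).map (·.1)

def pvStep (k : Int) (o : List Char) (pc : Int × Int) : List Char :=
  if pc.2 - pc.1 ≤ k then PySem.List.pySetD o pc.2 '-' else o

def pvMark (k : Int) (o : List Char) (idxs : List Int) : List Char :=
  (idxs.zip idxs.tail).foldl (pvStep k) o

-- membership in occurrence lists
theorem pvOcc_mem (cs : List Char) (c : Char) (j : Int) :
    j ∈ pvOcc cs c ↔ ∃ (m : Nat) (h : m < cs.length), j = (m : Int) ∧ cs[m] = c := by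
  simp only [pvOcc, List.mem_map, List.mem_filter, PySem.List.mem_enumerate_iff]
  constructor
  · rintro ⟨p, ⟨⟨m, hm, rfl⟩, hc⟩, rfl⟩
    exact ⟨m, hm, by simp, by simpa using hc⟩
  · rintro ⟨m, hm, rfl, rfl⟩
    exact ⟨((m : Int), cs[m]), ⟨⟨m, hm, by simp⟩, by simp⟩, rfl⟩

theorem pvOcc_pairwise (cs : List Char) (c : Char) : (pvOcc cs c).Pairwise (· < ·) := by
  apply List.Pairwise.map
  · exact fun p q h => h
  · exact (PySem.List.pairwise_lt_enumerate cs 0).filter _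

theorem pv_zip_tail_mem {l : List Int} {pc : Int × Int} :
    pc ∈ l.zip l.tail ↔ ∃ (m : Nat) (h : m + 1 < l.length), pc = (l[m], l[m + 1]) := by
  constructor
  · intro h
    rw [List.mem_iff_getElem] at h
    obtain ⟨m, hm, he⟩ := h
    have hlen : m + 1 < l.length := by
      have := hm
      simp [List.length_zip, List.length_tail] at this
      omega
    refine ⟨m, hlen, ?_⟩
    rw [← he, List.getElem_zip]
    congr 1
    simp [List.getElem_tail]
  · rintro ⟨m, hm, rfl⟩
    rw [List.mem_iff_getElem]
    refine ⟨m, ?_, ?_⟩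
    · simp [List.length_zip, List.length_tail]; omega
    · rw [List.getElem_zip]; congr 1; simp [List.getElem_tail]

theorem pvMark_length (k : Int) (o : List Char) (ps : List (Int × Int)) :
    (ps.foldl (pvStep k) o).length = o.length := by
  induction ps generalizing o with
  | nil => rfl
  | cons pc ps ih =>
    rw [List.foldl_cons, ih]
    unfold pvStep
    split
    · exact PySem.List.length_pySetD _ _ _
    · rfl

theorem pvMark_getElem? (k : Int) (ps : List (Int × Int)) (o : List Char) (i : Nat)
    (hi : i < o.length) (hpos : ∀ pc ∈ ps, 0 ≤ pc.2) :
    (ps.foldl (pvStep k) o)[i]? =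
      if ∃ pc ∈ ps, pc.2 - pc.1 ≤ k ∧ pc.2 = (i : Int) then some '-' else o[i]? := by
  induction ps generalizing o with
  | nil => simp
  | cons pc ps ih =>
    rw [List.foldl_cons]
    have hlen : (pvStep k o pc).length = o.length := by
      unfold pvStep; split
      · exact PySem.List.length_pySetD _ _ _
      · rfl
    rw [ih (pvStep k o pc) (hlen ▸ hi) (fun q hq => hpos q (List.mem_cons_of_mem _ hq))]
    by_cases hrest : ∃ q ∈ ps, q.2 - q.1 ≤ k ∧ q.2 = (i : Int)
    · obtain ⟨q, hq, hc⟩ := hrest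
      rw [if_pos ⟨q, hq, hc⟩, if_pos ⟨q, List.mem_cons_of_mem _ hq, hc⟩]
    · rw [if_neg hrest]
      by_cases hthis : pc.2 - pc.1 ≤ k ∧ pc.2 = (i : Int)
      · rw [if_pos ⟨pc, List.mem_cons_self, hthis⟩]
        unfold pvStep
        rw [if_pos hthis.1]
        rw [PySem.List.pySetD_of_nonneg _ _ (hpos pc List.mem_cons_self)]
        have : pc.2.toNat = i := by have := hthis.2; omega
        rw [this, List.getElem?_set_self]
        simp [hi]
      · have : ¬ ∃ q ∈ pc :: ps, q.2 - q.1 ≤ k ∧ q.2 = (i : Int) := by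
          rintro ⟨q, hq, hcond⟩
          rcases List.mem_cons.mp hq with rfl | hq'
          · exact hthis hcond
          · exact hrest ⟨q, hq', hcond⟩
        rw [if_neg this]
        unfold pvStep
        split
        · rename_i hle
          rw [PySem.List.pySetD_of_nonneg _ _ (hpos pc List.mem_cons_self)]
          rw [List.getElem?_set]
          have : pc.2.toNat ≠ i := by
            intro h
            exact hthis ⟨hle, by have := hpos pc List.mem_cons_self; omega⟩
          simp [this]
        · rfl

theorem pvOuter_length (k : Int) (L : List (List Int)) (o : List Char) :
    (L.foldl (pvMark k) o).length = o.length := by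
  induction L generalizing o with
  | nil => rfl
  | cons idxs L ih => rw [List.foldl_cons, ih]; exact pvMark_length k o _

theorem pvOuter_getElem? (k : Int) (L : List (List Int)) (o : List Char) (i : Nat)
    (hi : i < o.length) (hpos : ∀ idxs ∈ L, ∀ pc ∈ idxs.zip idxs.tail, 0 ≤ pc.2) :
    (L.foldl (pvMark k) o)[i]? =
      if ∃ idxs ∈ L, ∃ pc ∈ idxs.zip idxs.tail, pc.2 - pc.1 ≤ k ∧ pc.2 = (i : Int)
      then some '-' else o[i]? := by
  induction L generalizing o with
  | nil => simp
  | cons idxs L ih =>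
    rw [List.foldl_cons]
    have hlen : (pvMark k o idxs).length = o.length := pvMark_length k o _
    rw [ih (pvMark k o idxs) (hlen ▸ hi) (fun l hl => hpos l (List.mem_cons_of_mem _ hl))]
    by_cases hrest : ∃ l ∈ L, ∃ pc ∈ l.zip l.tail, pc.2 - pc.1 ≤ k ∧ pc.2 = (i : Int)
    · obtain ⟨l, hl, hc⟩ := hrest
      rw [if_pos ⟨l, hl, hc⟩, if_pos ⟨l, List.mem_cons_of_mem _ hl, hc⟩]
    · rw [if_neg hrest]
      unfold pvMark
      rw [pvMark_getElem? k _ o i hi (hpos idxs List.mem_cons_self)]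
      by_cases hthis : ∃ pc ∈ idxs.zip idxs.tail, pc.2 - pc.1 ≤ k ∧ pc.2 = (i : Int)
      · rw [if_pos hthis, if_pos ⟨idxs, List.mem_cons_self, hthis⟩]
      · rw [if_neg hthis, if_neg]
        rintro ⟨l, hl, hc⟩
        rcases List.mem_cons.mp hl with rfl | hl'
        · exact hthis hc
        · exact hrest ⟨l, hl', hc⟩

theorem pvA_cond (cs : List Char) (k : Int) (i : Nat) (hi : i < cs.length) (c : Char) :
    c ∈ PySem.List.slice cs (some (max 0 ((i : Int) - k))) (some (i : Int)) ↔
      ∃ (j : Nat) (hj : j < cs.length), j < i ∧ cs[j] = c ∧ (i : Int) - (j : Int) ≤ k := by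
  have ha : (0 : Int) ≤ max 0 ((i : Int) - k) := le_max_left _ _
  rw [PySem.List.slice_toNat cs ha (by positivity)]
  have hak : ((max 0 ((i : Int) - k)).toNat : Int) = max 0 ((i : Int) - k) :=
    Int.toNat_of_nonneg ha
  set a : Nat := (max 0 ((i : Int) - k)).toNat with hadef
  constructor
  · intro h
    rw [List.mem_iff_getElem] at h
    obtain ⟨m, hm, he⟩ := h
    simp only [List.length_take, List.length_drop, Int.toNat_natCast, lt_min_iff] at hm
    rw [List.getElem_take, List.getElem_drop] at he
    refine ⟨a + m, by omega, by omega, he, by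
      rw [Int.natCast_add]
      have h1 : (i : Int) - k ≤ (a : Int) := hak ▸ le_max_right _ _
      omega⟩
  · rintro ⟨j, hj, hji, he, hk⟩
    rw [List.mem_iff_getElem]
    have haj : a ≤ j := by
      have h1 : max 0 ((i : Int) - k) ≤ (j : Int) := max_le (by positivity) (by omega)
      rw [← hak] at h1
      exact_mod_cast h1
    have hai : a ≤ i := le_trans haj (Nat.le_of_lt hji)
    refine ⟨j - a, ?_, ?_⟩
    · simp only [List.length_take, List.length_drop, Int.toNat_natCast, lt_min_iff]
      omega
    · rw [List.getElem_take, List.getElem_drop]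
      have : a + (j - a) = j := by omega
      simp only [this]
      exact he

theorem pvOcc_nonneg (cs : List Char) (c : Char) : ∀ j ∈ pvOcc cs c, 0 ≤ j := by
  intro j hj
  obtain ⟨m, hm, rfl, _⟩ := (pvOcc_mem cs c j).mp hj
  exact Int.natCast_nonneg m

theorem pvB_cond (cs : List Char) (k : Int) (i : Nat) (hi : i < cs.length) :
    (∃ idxs ∈ (PySem.Set.ofList cs).map (pvOcc cs),
        ∃ pc ∈ idxs.zip idxs.tail, pc.2 - pc.1 ≤ k ∧ pc.2 = (i : Int)) ↔
      ∃ (j : Nat) (hj : j < cs.length), j < i ∧ cs[j] = cs[i] ∧ (i : Int) - (j : Int) ≤ k := by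
  constructor
  · rintro ⟨idxs, hidxs, pc, hpc, hle, hcur⟩
    obtain ⟨c, _, rfl⟩ := List.mem_map.mp hidxs
    obtain ⟨m, hm, hpcdef⟩ := pv_zip_tail_mem.mp hpc
    have hmem2 : (pvOcc cs c)[m + 1] ∈ pvOcc cs c := List.getElem_mem _
    have hmem1 : (pvOcc cs c)[m] ∈ pvOcc cs c := List.getElem_mem _
    obtain ⟨mi, hmi, hieq, hci⟩ := (pvOcc_mem cs c _).mp hmem2
    obtain ⟨j, hjlt, hjeq, hcj⟩ := (pvOcc_mem cs c _).mp hmem1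
    have hcur' : (pvOcc cs c)[m + 1] = (i : Int) := by rw [hpcdef] at hcur; exact hcur
    have hmi_i : mi = i := by rw [hcur'] at hieq; exact_mod_cast hieq.symm
    subst hmi_i
    have hlt : (pvOcc cs c)[m] < (pvOcc cs c)[m + 1] := by
      exact List.pairwise_iff_getElem.mp (pvOcc_pairwise cs c) m (m + 1) _ _ (by omega)
    refine ⟨j, hjlt, ?_, by rw [hcj, hci], ?_⟩
    · rw [hjeq, hcur'] at hlt; exact_mod_cast hlt
    · rw [hpcdef] at hle
      simp only at hle
      rw [hjeq, hcur'] at hle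
      exact hle
  · rintro ⟨j, hj, hji, hc, hk⟩
    have hcmem : cs[i] ∈ PySem.Set.ofList cs := by
      rw [PySem.Set.mem_ofList]; exact List.getElem_mem _
    have himem : (i : Int) ∈ pvOcc cs cs[i] := (pvOcc_mem cs _ _).mpr ⟨i, hi, rfl, rfl⟩
    have hjmem : (j : Int) ∈ pvOcc cs cs[i] := (pvOcc_mem cs _ _).mpr ⟨j, hj, rfl, hc⟩
    set l := pvOcc cs cs[i] with hl
    obtain ⟨t, ht, hti⟩ := List.mem_iff_getElem.mp himem
    obtain ⟨u, hu, huj⟩ := List.mem_iff_getElem.mp hjmem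
    have hpw := List.pairwise_iff_getElem.mp (pvOcc_pairwise cs cs[i])
    have hut : u < t := by
      by_contra hcon
      rcases Nat.lt_or_ge t u with h | h
      · have := hpw t u ht hu h
        rw [hti, huj] at this
        omega
      · have : t = u := by omega
        subst this
        rw [hti] at huj
        omega
    have ht1 : t - 1 + 1 = t := by omega
    refine ⟨l, List.mem_map.mpr ⟨cs[i], hcmem, rfl⟩, (l[t - 1], l[t - 1 + 1]),
      pv_zip_tail_mem.mpr ⟨t - 1, by omega, rfl⟩, ?_, ?_⟩
    · simp only [ht1, hti]
      have hjle : l[u] ≤ l[t - 1] := by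
        rcases Nat.lt_or_ge u (t - 1) with h | h
        · exact le_of_lt (hpw u (t - 1) hu (by simp only [← hl]; omega) h)
        · have : u = t - 1 := by omega
          subst this; exact le_refl _
      rw [huj] at hjle
      omega
    · simp only [ht1, hti]

def pvDict (cs : List Char) : PySem.Dict Char (List Int) :=
  (PySem.List.enumerate cs).foldl (fun d p => d.modify p.2 [] (· ++ [p.1])) PySem.Dict.empty

theorem pvDict_getD (cs : List Char) (c : Char) : (pvDict cs).getD c [] = pvOcc cs c := by
  unfold pvDict
  have h := PySem.Dict.getD_foldl_modify_append ((PySem.List.enumerate cs).map Prod.swap)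
    (PySem.Dict.empty : PySem.Dict Char (List Int)) c
  rw [List.foldl_map] at h
  simp only [Prod.fst_swap, Prod.snd_swap, List.filter_map, List.map_map] at h
  rw [h]
  simp [pvOcc, Function.comp_def]

theorem pvDict_keys (cs : List Char) : (pvDict cs).keys = PySem.Set.ofList cs := by
  unfold pvDict
  rw [PySem.Dict.keys_foldl_modify_key (PySem.List.enumerate cs) (fun p => p.2) []
    (fun _ p => (· ++ [p.1])) PySem.Dict.empty]
  simp [PySem.Set.update_nil_left, PySem.List.map_snd_enumerate]

theorem pvDict_nodup_keys (cs : List Char) : (pvDict cs).keys.Nodup := by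
  rw [pvDict_keys]
  exact PySem.Set.nodup_ofList cs

theorem pvDict_values (cs : List Char) :
    (pvDict cs).values = (PySem.Set.ofList cs).map (pvOcc cs) := by
  rw [PySem.Dict.values_eq_map_keys _ (pvDict_nodup_keys cs) [], pvDict_keys]
  exact List.map_congr_left fun c _ => pvDict_getD cs c

theorem pvMain (cs : List Char) (k : Int) :
    (PySem.List.enumerate cs).foldl
      (fun acc p =>
        if p.2 ∈ PySem.List.slice cs (some (max 0 (p.1 - k))) (some p.1)
        then acc ++ ['-'] else acc ++ [p.2]) ([] : List Char)
    = ((pvDict cs).values).foldl (pvMark k) cs := by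
  have hfun : (fun (acc : List Char) (p : Int × Char) =>
      if p.2 ∈ PySem.List.slice cs (some (max 0 (p.1 - k))) (some p.1)
      then acc ++ ['-'] else acc ++ [p.2]) =
      fun acc p => acc ++ [if p.2 ∈ PySem.List.slice cs (some (max 0 (p.1 - k))) (some p.1)
        then '-' else p.2] := by
    funext acc p; split <;> rfl
  rw [hfun, PySem.List.foldl_append_singleton_eq_map, List.nil_append, pvDict_values]
  have hpos : ∀ idxs ∈ (PySem.Set.ofList cs).map (pvOcc cs),
      ∀ pc ∈ idxs.zip idxs.tail, 0 ≤ pc.2 := by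
    rintro idxs hidx pc hpc
    obtain ⟨c, -, rfl⟩ := List.mem_map.mp hidx
    obtain ⟨m, hm, rfl⟩ := pv_zip_tail_mem.mp hpc
    exact pvOcc_nonneg cs c _ (List.getElem_mem _)
  apply List.ext_getElem?
  intro i
  by_cases hi : i < cs.length
  · rw [pvOuter_getElem? k _ cs i hi hpos]
    rw [List.getElem?_map, PySem.List.getElem?_enumerate, List.getElem?_eq_getElem hi]
    simp only [Option.map_some, zero_add]
    have hA := pvA_cond cs k i hi cs[i]
    have hB := pvB_cond cs k i hi
    by_cases hnear : ∃ (j : Nat) (hj : j < cs.length), j < i ∧ cs[j] = cs[i] ∧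
        (i : Int) - (j : Int) ≤ k
    · rw [if_pos (hA.mpr hnear), if_pos (hB.mpr hnear)]
    · rw [if_neg (fun h => hnear (hA.mp h)), if_neg (fun h => hnear (hB.mp h))]
  · rw [List.getElem?_eq_none, List.getElem?_eq_none]
    · rw [pvOuter_length]; omega
    · rw [List.length_map, PySem.List.length_enumerate]; omega

-- ===== VERDICT (by name: the statement is the Claim_ definition above) =====
theorem replace_repeated_chars_spec : Claim_equal_replace_repeated_chars := by
  intro s k _
  show replace_repeated_chars s k = replace_repeated_chars_alt s k
  exact congrArg String.ofList (pvMain s.toList k)
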